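-- pv_equiv track=rewrite | github.com/fies09/uav_project | 跑道巡检_bc/rectangle.py | compute_startpoint
-- ===== SOURCE A (Python) =====
-- def compute_startpoint(shape):
--     # 计算起始点坐标
--     x_step = shape[0] // 3
--     y_step = shape[1] // 3
--     start_point = []
--     x, y = 0, 0
--     for i in range(1, 10):
--         start_point.append([x, y])
--         y += y_step
--         if i % 3 == 0:
--             x += x_step
--             y = 0
--     return start_point
-- ===== SOURCE B (Python) =====
-- def compute_startpoint(shape):
--     x_step = shape[0] // 3
--     y_step = shape[1] // 3
--     start_point = []
--     for i in range(3):
--         for j in range(3):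
--             start_point.append([i * x_step, j * y_step])
--     return start_point
-- ===== Notes on version B (the rewrite author's own statement) =====
-- stated objective: idiomatic
-- what changed: Replaces the flat 9-step loop with mutable x/y accumulators and a modulo-3 reset by a nested i/j double loop computing each point in closed form as [i*x_step, j*y_step].
import Mathlib
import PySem

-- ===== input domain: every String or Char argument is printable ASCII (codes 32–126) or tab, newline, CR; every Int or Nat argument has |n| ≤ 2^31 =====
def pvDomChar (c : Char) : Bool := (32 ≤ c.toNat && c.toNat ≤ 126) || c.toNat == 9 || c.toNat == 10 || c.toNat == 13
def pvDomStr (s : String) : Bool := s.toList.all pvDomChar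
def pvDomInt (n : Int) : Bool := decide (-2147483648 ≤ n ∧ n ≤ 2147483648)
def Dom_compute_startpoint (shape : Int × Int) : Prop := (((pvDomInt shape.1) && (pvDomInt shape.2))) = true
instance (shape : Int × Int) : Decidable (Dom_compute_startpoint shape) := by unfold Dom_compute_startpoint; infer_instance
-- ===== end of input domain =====

-- B replaces A's flat loop with running x/y accumulators and a modulo-3 reset
-- by a nested double loop computing each point directly as [i*x_step, j*y_step].

-- ===== PORT A =====
def compute_startpoint (shape : Int × Int) : List (List Int) :=
  let x_step := PySem.Int.floordiv shape.1 3
  let y_step := PySem.Int.floordiv shape.2 3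
  let st := (PySem.List.pyRange 1 10 1).foldl
    (fun (acc : List (List Int) × Int × Int) i =>
      let sp := acc.1 ++ [[acc.2.1, acc.2.2]]
      let y := acc.2.2 + y_step
      if PySem.Int.mod i 3 = 0 then (sp, acc.2.1 + x_step, 0)
      else (sp, acc.2.1, y))
    ([], 0, 0)
  st.1

-- ===== PORT B =====
def compute_startpoint_alt (shape : Int × Int) : List (List Int) :=
  let x_step := PySem.Int.floordiv shape.1 3
  let y_step := PySem.Int.floordiv shape.2 3
  (PySem.List.pyRange 0 3 1).foldl
    (fun acc i =>
      (PySem.List.pyRange 0 3 1).foldl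
        (fun acc2 j => acc2 ++ [[i * x_step, j * y_step]]) acc)
    []

-- ===== PRECONDITION & SPEC =====
def Spec_compute_startpoint (shape : Int × Int) (out : List (List Int)) : Prop := out = compute_startpoint_alt shape
instance (shape : Int × Int) (out : List (List Int)) : Decidable (Spec_compute_startpoint shape out) := by unfold Spec_compute_startpoint; infer_instance

-- ===== CLAIM (what is proved, stated in full; the proofs are below) =====
def Claim_equal_compute_startpoint : Prop := ∀ (shape : Int × Int), Dom_compute_startpoint shape → Spec_compute_startpoint shape (compute_startpoint shape)

-- ===== LEMMAS AND PROOFS =====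

-- ===== VERDICT (by name: the statement is the Claim_ definition above) =====
theorem compute_startpoint_spec : Claim_equal_compute_startpoint := by
  intro shape _
  show _ = _
  simp [compute_startpoint, compute_startpoint_alt, PySem.List.pyRange,
        PySem.Int.mod, PySem.Int.floordiv, List.range_succ]
  norm_num [Int.fmod]
  omega
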